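-- pv_equiv track=rewrite | github.com/ElenaKirshanova/Lectures | Lattices2022/Lab2/all_short_vectors.py | get_uv_value
-- ===== SOURCE A (Python) =====
-- def get_uv_value(e,n,P):
-- 	u = 1
-- 	k = 1
-- 	a = [0]*n
-- 	b = [0]*n
-- 	for i in range(n):
-- 		if e[i] > 0:
-- 			u *= P[i]**e[i]
-- 			a[i] = e[i]
-- 		if e[i] < 0:
-- 			k *= P[i]**(-e[i])
-- 			b[i] = -e[i]
-- 	return u,k,a,b
-- ===== SOURCE B (Python) =====
-- def get_uv_value(e, n, P):
--     # Divide and conquer over the index interval [lo, hi): compute the four outputs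
--     # for each half and combine (products multiply, exponent tables concatenate).
--     def go(lo, hi):
--         if hi - lo == 1:
--             x = e[lo]
--             if x > 0:
--                 return P[lo] ** x, 1, [x], [0]
--             if x < 0:
--                 return 1, P[lo] ** (-x), [0], [-x]
--             return 1, 1, [0], [0]
--         mid = (lo + hi) // 2
--         uL, kL, aL, bL = go(lo, mid)
--         uR, kR, aR, bR = go(mid, hi)
--         return uL * uR, kL * kR, aL + aR, bL + bR
--
--     if n <= 0:
--         return 1, 1, [], []
--     return go(0, n)
-- ===== Notes on version B (the rewrite author's own statement) =====
-- stated objective: alternative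
-- what changed: A's single fused left-to-right loop threading four pieces of state is replaced by a divide-and-conquer recursion on the index interval [0, n): each half is solved independently and the four outputs are combined by multiplying the two products and concatenating the two exponent tables.
import Mathlib
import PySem

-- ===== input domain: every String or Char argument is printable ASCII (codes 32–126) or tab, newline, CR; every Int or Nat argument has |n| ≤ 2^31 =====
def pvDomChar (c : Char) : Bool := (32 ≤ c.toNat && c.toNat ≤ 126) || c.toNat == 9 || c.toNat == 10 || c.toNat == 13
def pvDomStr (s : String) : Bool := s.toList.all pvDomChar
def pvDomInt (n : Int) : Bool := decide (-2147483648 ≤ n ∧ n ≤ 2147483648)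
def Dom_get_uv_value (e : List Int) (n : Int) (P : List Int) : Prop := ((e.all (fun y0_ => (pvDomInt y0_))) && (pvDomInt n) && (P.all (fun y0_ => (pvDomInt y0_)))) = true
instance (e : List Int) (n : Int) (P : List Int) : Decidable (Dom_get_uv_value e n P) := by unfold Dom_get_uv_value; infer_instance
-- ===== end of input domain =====

-- B replaces A's single fused left-to-right loop by a divide-and-conquer recursion on the
-- index interval [0, n): each half is solved recursively and the four outputs are combined
-- (products multiply, exponent tables concatenate); objective: alternative.

-- ===== PORT A =====
-- one fused loop over range(n), threading (u, k, a, b); [0]*n is replicate n.toNat 0 ([] for n < 0)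
def get_uv_value (e : List Int) (n : Int) (P : List Int) : Int × Int × List Int × List Int :=
  (PySem.List.pyRange 0 n 1).foldl
    (fun s i =>
      let ei := PySem.List.pyGetD e i 0
      let s1 := if ei > 0 then
          (s.1 * PySem.List.pyGetD P i 0 ^ ei.toNat, s.2.1, PySem.List.pySetD s.2.2.1 i ei, s.2.2.2)
        else s
      if ei < 0 then
          (s1.1, s1.2.1 * PySem.List.pyGetD P i 0 ^ (-ei).toNat, s1.2.2.1, PySem.List.pySetD s1.2.2.2 i (-ei))
        else s1)
    (1, 1, List.replicate n.toNat 0, List.replicate n.toNat 0)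

-- ===== PORT B =====
-- Source B's inner go(lo, hi): divide and conquer on the half-open interval [lo, hi).
-- The fuel parameter is a totality guard only: the caller passes fuel = n.toNat, which
-- bounds the interval length, and every recursive call halves the interval, so the
-- fuel is never exhausted (Python's go has no such parameter and simply recurses).
def pvGo (e P : List Int) (fuel : Nat) (lo hi : Int) : Int × Int × List Int × List Int :=
  match fuel with
  | 0 => (1, 1, [], [])
  | fuel + 1 =>
    if hi - lo = 1 then
      let x := PySem.List.pyGetD e lo 0
      if x > 0 then (PySem.List.pyGetD P lo 0 ^ x.toNat, 1, [x], [0])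
      else if x < 0 then (1, PySem.List.pyGetD P lo 0 ^ (-x).toNat, [0], [-x])
      else (1, 1, [0], [0])
    else
      let mid := PySem.Int.floordiv (lo + hi) 2
      let L := pvGo e P fuel lo mid
      let R := pvGo e P fuel mid hi
      (L.1 * R.1, L.2.1 * R.2.1, L.2.2.1 ++ R.2.2.1, L.2.2.2 ++ R.2.2.2)

def get_uv_value_alt (e : List Int) (n : Int) (P : List Int) : Int × Int × List Int × List Int :=
  if n ≤ 0 then (1, 1, [], []) else pvGo e P n.toNat 0 n

-- ===== PRECONDITION & SPEC =====
-- Pre_ excludes exactly the inputs where A raises IndexError: n beyond len(e), or some index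
-- i < n with e[i] ≠ 0 and i beyond len(P).  (B raises on exactly the same inputs.)
def Pre_get_uv_value (e : List Int) (n : Int) (P : List Int) : Prop :=
  n ≤ (e.length : Int) ∧ ∀ i < n.toNat, e.getD i 0 ≠ 0 → i < P.length
instance (e : List Int) (n : Int) (P : List Int) : Decidable (Pre_get_uv_value e n P) := by
  unfold Pre_get_uv_value; infer_instance

def pvWitness_get_uv_value : List Int × Int × List Int := ([2, -1, 0], 3, [2, 3, 5])

def Spec_get_uv_value (e : List Int) (n : Int) (P : List Int) (out : Int × Int × List Int × List Int) : Prop := out = get_uv_value_alt e n P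
instance (e : List Int) (n : Int) (P : List Int) (out : Int × Int × List Int × List Int) : Decidable (Spec_get_uv_value e n P out) := by unfold Spec_get_uv_value; infer_instance

-- ===== CLAIM (what is proved, stated in full; the proofs are below) =====
def Claim_equal_get_uv_value : Prop := ∀ (e : List Int) (n : Int) (P : List Int), Dom_get_uv_value e n P → Pre_get_uv_value e n P → Spec_get_uv_value e n P (get_uv_value e n P)

-- ===== LEMMAS AND PROOFS =====

-- A's loop body, named for the proofs (definitionally the lambda inside get_uv_value)
def pvStepA (e P : List Int) (s : Int × Int × List Int × List Int) (i : Int) : Int × Int × List Int × List Int :=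
  let ei := PySem.List.pyGetD e i 0
  let s1 := if ei > 0 then
      (s.1 * PySem.List.pyGetD P i 0 ^ ei.toNat, s.2.1, PySem.List.pySetD s.2.2.1 i ei, s.2.2.2)
    else s
  if ei < 0 then
      (s1.1, s1.2.1 * PySem.List.pyGetD P i 0 ^ (-ei).toNat, s1.2.2.1, PySem.List.pySetD s1.2.2.2 i (-ei))
    else s1

-- the u-product (resp. k-product) over the index segment [lo, lo+len): the common
-- characterisation both ports are proved equal to
def pvSegU (e P : List Int) (lo len : Nat) : Int :=
  ((List.range' lo len).filter (fun i => decide (0 < e.getD i 0))).foldl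
    (fun r i => r * P.getD i 0 ^ (e.getD i 0).toNat) 1

def pvSegK (e P : List Int) (lo len : Nat) : Int :=
  ((List.range' lo len).filter (fun i => decide (e.getD i 0 < 0))).foldl
    (fun r i => r * (P.getD i 0) ^ (-(e.getD i 0)).toNat) 1

theorem pvFoldMul (f : Nat → Int) (l : List Nat) (c : Int) :
    l.foldl (fun r i => r * f i) c = c * l.foldl (fun r i => r * f i) 1 := by
  induction l generalizing c with
  | nil => simp
  | cons x xs ih => simp only [List.foldl_cons]; rw [ih (c * f x), ih (1 * f x)]; ring

theorem pvSegU_split (e P : List Int) (lo a b : Nat) :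
    pvSegU e P lo (a + b) = pvSegU e P lo a * pvSegU e P (lo + a) b := by
  unfold pvSegU
  rw [← List.range'_append (step := 1), List.filter_append, List.foldl_append,
    pvFoldMul _ (List.filter _ (List.range' (lo + 1 * a) b))]
  simp

theorem pvSegK_split (e P : List Int) (lo a b : Nat) :
    pvSegK e P lo (a + b) = pvSegK e P lo a * pvSegK e P (lo + a) b := by
  unfold pvSegK
  rw [← List.range'_append (step := 1), List.filter_append, List.foldl_append,
    pvFoldMul _ (List.filter _ (List.range' (lo + 1 * a) b))]
  simp

theorem pvSegU_one (e P : List Int) (j : Nat) :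
    pvSegU e P j 1 = if 0 < e.getD j 0 then (P.getD j 0) ^ (e.getD j 0).toNat else 1 := by
  unfold pvSegU
  by_cases h : 0 < e.getD j 0 <;> simp only [List.getD] at h ⊢ <;> simp [List.range', h]

theorem pvSegK_one (e P : List Int) (j : Nat) :
    pvSegK e P j 1 = if e.getD j 0 < 0 then (P.getD j 0) ^ (-(e.getD j 0)).toNat else 1 := by
  unfold pvSegK
  by_cases h : e.getD j 0 < 0 <;> simp only [List.getD] at h ⊢ <;> simp [List.range', h]

theorem pvSegU_zero_succ (e P : List Int) (j : Nat) :
    pvSegU e P 0 (j+1) = if 0 < e.getD j 0 then pvSegU e P 0 j * (P.getD j 0) ^ (e.getD j 0).toNat else pvSegU e P 0 j := by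
  rw [pvSegU_split e P 0 j 1, pvSegU_one, Nat.zero_add]
  split_ifs with h <;> simp

theorem pvSegK_zero_succ (e P : List Int) (j : Nat) :
    pvSegK e P 0 (j+1) = if e.getD j 0 < 0 then pvSegK e P 0 j * (P.getD j 0) ^ (-(e.getD j 0)).toNat else pvSegK e P 0 j := by
  rw [pvSegK_split e P 0 j 1, pvSegK_one, Nat.zero_add]
  split_ifs with h <;> simp

theorem pvSetPrefix2 (l1 l2 : List Int) (x v : Int) (j : Nat) (h : l1.length = j) :
    (l1 ++ x :: l2).set j v = l1 ++ v :: l2 := by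
  subst h; simp

-- Loop invariant for A: after j iterations the state is the segment products and the
-- clamped-exponent prefix tables
theorem pvLoopInv (e P : List Int) (N j : Nat) (hj : j ≤ N) (hje : j ≤ e.length)
    (hP : ∀ i < j, e.getD i 0 ≠ 0 → i < P.length) :
    ((PySem.List.pyRange 0 (j : Int) 1).foldl (pvStepA e P)
      (1, 1, List.replicate N 0, List.replicate N 0))
    = (pvSegU e P 0 j, pvSegK e P 0 j,
       (e.take j).map (fun x => max x 0) ++ List.replicate (N - j) 0,
       (e.take j).map (fun x => max (-x) 0) ++ List.replicate (N - j) 0) := by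
  induction j with
  | zero => simp [pvSegU, pvSegK]
  | succ j ih =>
    have hjN : j < N := hj
    have hjl : j < e.length := hje
    have hc : (((j+1 : Nat)) : Int) = (j : Int) + 1 := by push_cast; ring
    rw [hc, PySem.List.pyRange_one_succ_right (by positivity), List.foldl_append,
      ih (le_of_lt hjN) (le_of_lt hjl) (fun i hi h0 => hP i (Nat.lt_succ_of_lt hi) h0),
      pvSegU_zero_succ, pvSegK_zero_succ]
    have hD : e.getD j 0 = e[j] := List.getD_eq_getElem e 0 hjl
    have hgete : PySem.List.pyGetD e (j:Int) 0 = e[j] := by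
      simp [List.getElem?_eq_getElem hjl]
    have htake : e.take (j+1) = e.take j ++ [e[j]] := by
      rw [List.take_add_one]; simp [List.getElem?_eq_getElem hjl]
    have hlenA : ((e.take j).map (fun x : Int => max x 0)).length = j := by
      simp [hjl.le]
    have hlenB : ((e.take j).map (fun x : Int => max (-x) 0)).length = j := by
      simp [hjl.le]
    have hrep : List.replicate (N - j) (0:Int) = 0 :: List.replicate (N - (j+1)) 0 := by
      have h1 : N - j = (N - (j+1)) + 1 := by omega
      rw [h1, List.replicate_succ]
    rw [hD]
    simp only [List.foldl_cons, List.foldl_nil, pvStepA, hgete]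
    rcases lt_trichotomy (e[j] : Int) 0 with hsgn | hsgn | hsgn
    · have hPj : j < P.length := hP j (Nat.lt_succ_self j) (by rw [hD]; omega)
      have hgetP : PySem.List.pyGetD P (j:Int) 0 = P[j] := by
        simp [List.getElem?_eq_getElem hPj]
      simp only [if_pos hsgn, if_neg (show ¬((0:Int) < e[j]) from by omega),
        PySem.List.pySetD_natCast, hgetP, List.getD_eq_getElem P 0 hPj,
        Prod.mk.injEq]
      refine ⟨trivial, trivial, ?_, ?_⟩
      · rw [htake, List.map_append, hrep, List.append_assoc]
        simp [max_eq_right hsgn.le]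
      · rw [hrep, pvSetPrefix2 _ _ _ _ _ hlenB, htake, List.map_append, List.append_assoc]
        simp [max_eq_left (by omega : (0:Int) ≤ -e[j])]
    · simp only [if_neg (show ¬((0:Int) < e[j]) from by omega),
        if_neg (show ¬(e[j] < (0:Int)) from by omega), Prod.mk.injEq]
      refine ⟨trivial, trivial, ?_, ?_⟩
      · rw [htake, List.map_append, hrep, List.append_assoc]
        simp [hsgn]
      · rw [htake, List.map_append, hrep, List.append_assoc]
        simp [hsgn]
    · have hPj : j < P.length := hP j (Nat.lt_succ_self j) (by rw [hD]; omega)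
      have hgetP : PySem.List.pyGetD P (j:Int) 0 = P[j] := by
        simp [List.getElem?_eq_getElem hPj]
      simp only [if_pos hsgn, if_neg (show ¬(e[j] < (0:Int)) from by omega),
        PySem.List.pySetD_natCast, hgetP, List.getD_eq_getElem P 0 hPj,
        Prod.mk.injEq]
      refine ⟨trivial, trivial, ?_, ?_⟩
      · rw [hrep, pvSetPrefix2 _ _ _ _ _ hlenA, htake, List.map_append, List.append_assoc]
        simp [max_eq_left hsgn.le]
      · rw [htake, List.map_append, hrep, List.append_assoc]
        simp [max_eq_right (by omega : -e[j] ≤ (0:Int))]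

-- B's recursion computes the same segment characterisation
theorem pvGoSpec (e P : List Int) (len : Nat) : ∀ (fuel lo : Nat), 0 < len → len ≤ fuel →
    lo + len ≤ e.length →
    (∀ i, lo ≤ i → i < lo + len → e.getD i 0 ≠ 0 → i < P.length) →
    pvGo e P fuel (lo : Int) (((lo + len : Nat)) : Int) =
      (pvSegU e P lo len, pvSegK e P lo len,
       ((e.drop lo).take len).map (fun x => max x 0),
       ((e.drop lo).take len).map (fun x => max (-x) 0)) := by
  induction len using Nat.strong_induction_on with
  | _ len ih =>
    intro fuel lo hpos hfuel hle hP
    obtain ⟨f, rfl⟩ : ∃ f, fuel = f + 1 := ⟨fuel - 1, by omega⟩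
    rcases eq_or_lt_of_le (Nat.one_le_iff_ne_zero.mpr (Nat.pos_iff_ne_zero.mp hpos)) with h1 | h2
    · -- len = 1
      have hlen : len = 1 := h1.symm
      subst hlen
      have hll : lo < e.length := by omega
      have hd : (((lo + 1 : Nat)) : Int) - (lo : Int) = 1 := by push_cast; ring
      have hx : e.getD lo 0 = e[lo] := List.getD_eq_getElem e 0 hll
      have hseg : (e.drop lo).take 1 = [e[lo]] := by
        simp [List.take_one, List.head?_drop, List.getElem?_eq_getElem hll]
      rw [pvGo]
      simp only [if_pos hd, PySem.List.pyGetD_natCast, hx, hseg, pvSegU_one, pvSegK_one,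
        List.map_cons, List.map_nil]
      split_ifs <;> first
        | (exfalso; omega)
        | (simp only [Prod.mk.injEq, true_and]; refine ⟨?_, ?_⟩ <;>
            (simp only [List.cons.injEq, and_true]; omega))
    · -- len ≥ 2
      rw [pvGo]
      have hd : (((lo + len : Nat)) : Int) - (lo : Int) = (len : Int) := by push_cast; ring
      rw [if_neg (by omega : ¬((((lo + len : Nat)) : Int) - (lo : Int) = 1))]
      -- the midpoint
      set m1 := len / 2 with hm1
      have hm1pos : 0 < m1 := by omega
      have hm1lt : m1 < len := by omega
      set m2 := len - m1 with hm2
      have hm2pos : 0 < m2 := by omega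
      have hm2lt : m2 < len := by omega
      have hmid : PySem.Int.floordiv ((lo : Int) + (((lo + len : Nat)) : Int)) 2
          = (((lo + m1 : Nat)) : Int) := by
        have hcast : (lo : Int) + (((lo + len : Nat)) : Int) = (((2 * lo + len : Nat)) : Int) := by
          push_cast; ring
        rw [hcast]
        have := PySem.Int.floordiv_natCast (2 * lo + len) 2
        have h2 : (2 * lo + len) / 2 = lo + m1 := by omega
        rw [h2] at this
        exact_mod_cast this
      rw [hmid]
      have hIH1 := ih m1 hm1lt f lo hm1pos (by omega) (by omega)
        (fun i h1 h2 h3 => hP i h1 (by omega) h3)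
      have hIH2 := ih m2 hm2lt f (lo + m1) hm2pos (by omega) (by omega)
        (fun i h1 h2 h3 => hP i (by omega) (by omega) h3)
      have hhi : (((lo + len : Nat)) : Int) = ((((lo + m1) + m2 : Nat)) : Int) := by
        push_cast; omega
      rw [hhi] at *
      simp only [hIH1, hIH2]
      have hsplit : len = m1 + m2 := by omega
      have hdrop : (e.drop lo).drop m1 = e.drop (lo + m1) := by rw [List.drop_drop]
      rw [hsplit, pvSegU_split, pvSegK_split, List.take_add, List.map_append,
        List.map_append, hdrop]

theorem pvFinal (e : List Int) (n : Int) (P : List Int)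
    (hne : n ≤ (e.length : Int)) (hPl : ∀ i < n.toNat, e.getD i 0 ≠ 0 → i < P.length) :
    get_uv_value e n P = get_uv_value_alt e n P := by
  have hA : get_uv_value e n P
      = (PySem.List.pyRange 0 n 1).foldl (pvStepA e P)
          (1, 1, List.replicate n.toNat 0, List.replicate n.toNat 0) := rfl
  by_cases hn : n ≤ 0
  · rw [hA, PySem.List.pyRange_one_eq_nil hn]
    have ht : n.toNat = 0 := Int.toNat_of_nonpos hn
    simp [get_uv_value_alt, hn, ht]
  · have hn0 : (0:Int) ≤ n := by omega
    obtain ⟨N, hN⟩ : ∃ N : Nat, n = (N : Int) := ⟨n.toNat, (Int.toNat_of_nonneg hn0).symm⟩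
    subst hN
    have hNpos : 0 < N := by omega
    have hNl : N ≤ e.length := by exact_mod_cast hne
    have hPl' : ∀ i < N, e.getD i 0 ≠ 0 → i < P.length := by
      intro i hi h0; exact hPl i (by simpa using hi) h0
    have hInv := pvLoopInv e P N N le_rfl hNl hPl'
    rw [hA]
    simp only [Int.toNat_natCast]
    rw [hInv]
    have hB : get_uv_value_alt e (N : Int) P = pvGo e P N 0 (N : Int) := by
      unfold get_uv_value_alt
      rw [if_neg (by omega : ¬ ((N : Nat) : Int) ≤ 0)]
      simp
    have hGo := pvGoSpec e P N N 0 hNpos le_rfl (by omega)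
      (fun i _ h2 h3 => hPl' i (by omega) h3)
    simp only [Nat.zero_add, Int.natCast_zero, List.drop_zero] at hGo
    rw [hB, hGo]
    simp

-- ===== VERDICT (by name: the statement is the Claim_ definition above) =====
theorem get_uv_value_spec : Claim_equal_get_uv_value := by
  intro e n P _ hpre
  obtain ⟨h1, h2⟩ := hpre
  show get_uv_value e n P = get_uv_value_alt e n P
  exact pvFinal e n P h1 h2
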